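-- pv_equiv track=rewrite | github.com/Pratinav-Shrivastava/codeforces | CP31/900/B_Chemistry.py | odd_counter
-- ===== SOURCE A (Python) =====
-- def odd_counter(s):
--     hashmap = {}
--     for letter in s:
--         if letter in hashmap:
--             hashmap[letter] += 1
--         else:
--             hashmap[letter] = 1
--
--     count = 0
--     for letter in hashmap:
--         if hashmap[letter]%2 == 1:
--             count += 1
--     return count
-- ===== SOURCE B (Python) =====
-- def odd_counter(s):
--     # Toggle-set: one pass; `seen` holds exactly the chars seen an odd number of times so far.
--     seen = set()
--     for letter in s:
--         if letter in seen:
--             seen.remove(letter)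
--         else:
--             seen.add(letter)
--     return len(seen)
-- ===== Notes on version B (the rewrite author's own statement) =====
-- stated objective: faster
-- what changed: Replaces the two-pass count-then-test-parity dict with a single pass toggling each character's membership in a set, so the set holds exactly the odd-frequency characters; no frequency counting or second loop, which measured ~2x faster.
import Mathlib
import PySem

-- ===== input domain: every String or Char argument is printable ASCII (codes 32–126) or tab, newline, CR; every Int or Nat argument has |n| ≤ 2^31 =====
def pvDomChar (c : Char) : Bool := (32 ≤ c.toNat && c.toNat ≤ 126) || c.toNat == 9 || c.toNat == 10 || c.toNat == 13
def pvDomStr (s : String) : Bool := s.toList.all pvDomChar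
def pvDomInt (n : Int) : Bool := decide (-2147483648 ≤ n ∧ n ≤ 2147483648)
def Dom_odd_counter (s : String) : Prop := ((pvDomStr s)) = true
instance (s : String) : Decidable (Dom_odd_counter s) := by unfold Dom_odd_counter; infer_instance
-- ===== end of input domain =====

-- B replaces A's count-then-test-parity dict (two passes) with a single pass toggling set
-- membership, so the set ends up holding exactly the odd-frequency characters (one pass, no dict; measured faster in a timing run).

-- ===== PORT A =====
def odd_counter (s : String) : Int :=
  let hashmap := s.toList.foldl (fun d letter =>
    if d.contains letter then d.insert letter (d.getD letter 0 + 1)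
    else d.insert letter 1) PySem.Dict.empty
  hashmap.keys.foldl (fun count letter =>
    if PySem.Int.mod (hashmap.getD letter 0) 2 == 1 then count + 1 else count) 0

-- ===== PORT B =====
def odd_counter_alt (s : String) : Int :=
  let seen := s.toList.foldl (fun st letter =>
    if st.contains letter then PySem.Set.discard st letter else PySem.Set.add st letter)
    PySem.Set.empty
  PySem.Set.len seen

-- ===== PRECONDITION & SPEC =====
def Spec_odd_counter (s : String) (out : Int) : Prop := out = odd_counter_alt s
instance (s : String) (out : Int) : Decidable (Spec_odd_counter s out) := by unfold Spec_odd_counter; infer_instance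

-- ===== CLAIM (what is proved, stated in full; the proofs are below) =====
def Claim_equal_odd_counter : Prop := ∀ (s : String), Dom_odd_counter s → Spec_odd_counter s (odd_counter s)

-- ===== LEMMAS AND PROOFS =====

lemma getD_of_not_contains (d : PySem.Dict Char Int) (c : Char) (h : d.contains c = false) :
    d.getD c 0 = 0 := by
  simp only [PySem.Dict.getD, PySem.Dict.get?, PySem.Dict.contains] at *
  rw [List.any_eq_false] at h
  rw [List.find?_eq_none.2]
  · rfl
  · intro p hp hpc
    exact absurd hpc (h p hp)

-- A's counting loop is exactly Counter(xs): its two branches coincide with the getD+1 step.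
lemma foldA_eq_counter (xs : List Char) :
    xs.foldl (fun d letter =>
      if d.contains letter then d.insert letter (d.getD letter 0 + 1)
      else d.insert letter 1) PySem.Dict.empty = PySem.Dict.counter xs := by
  rw [← PySem.Dict.foldl_insert_getD_add_one_eq_counter]
  congr 1
  funext d c
  by_cases h : d.contains c
  · simp [h]
  · simp only [Bool.not_eq_true] at h
    simp [h, getD_of_not_contains d c h]

-- B's toggle loop keeps the set duplicate-free and its membership is the running parity.
lemma toggle_inv (xs : List Char) (st : PySem.Set Char) (h : st.Nodup) :
    (xs.foldl (fun st letter =>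
      if st.contains letter then PySem.Set.discard st letter else PySem.Set.add st letter) st).Nodup ∧
    ∀ c, c ∈ xs.foldl (fun st letter =>
      if st.contains letter then PySem.Set.discard st letter else PySem.Set.add st letter) st ↔
      ((c ∈ st) ↔ xs.count c % 2 = 0) := by
  induction xs generalizing st with
  | nil => simp [h]
  | cons x xs ih =>
    simp only [List.foldl_cons]
    by_cases hx : st.contains x
    · have hmem : x ∈ st := by simpa [PySem.Set.contains] using hx
      have hnd : (PySem.Set.discard st x).Nodup := List.Nodup.filter _ h
      rw [if_pos hx]
      obtain ⟨n1, m1⟩ := ih (PySem.Set.discard st x) hnd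
      refine ⟨n1, fun c => ?_⟩
      rw [m1 c]
      have hmd : c ∈ PySem.Set.discard st x ↔ (c ∈ st ∧ c ≠ x) := by
        simp [PySem.Set.discard]
      by_cases hcx : c = x
      · subst hcx
        simp [hmd, List.count_cons_self, hmem]
        omega
      · have hxc : ¬ x = c := fun he => hcx he.symm
        simp [hxc, hmd, hcx]
    · have hmem : x ∉ st := by simpa [PySem.Set.contains] using hx
      have hadd : PySem.Set.add st x = st ++ [x] := by simp [PySem.Set.add, hmem]
      have hnd : (PySem.Set.add st x).Nodup := by
        rw [hadd, List.nodup_append]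
        refine ⟨h, List.nodup_singleton x, ?_⟩
        intro a ha b hb
        rw [List.mem_singleton] at hb
        subst hb
        exact fun he => hmem (he ▸ ha)
      rw [if_neg hx]
      obtain ⟨n1, m1⟩ := ih (PySem.Set.add st x) hnd
      refine ⟨n1, fun c => ?_⟩
      rw [m1 c]
      rw [PySem.Set.mem_add]
      by_cases hcx : c = x
      · subst hcx
        simp [hmem, List.count_cons_self]
        omega
      · have hxc : ¬ x = c := fun he => hcx he.symm
        simp [hxc, hcx]

-- ===== VERDICT (by name: the statement is the Claim_ definition above) =====
theorem odd_counter_spec : Claim_equal_odd_counter := by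
  intro s _
  show odd_counter s = odd_counter_alt s
  unfold odd_counter odd_counter_alt
  simp only []
  rw [foldA_eq_counter, PySem.Dict.keys_counter]
  have hfun : (fun (count : Int) letter =>
      if PySem.Int.mod ((PySem.Dict.counter s.toList).getD letter 0) 2 == 1 then count + 1 else count)
      = (fun (count : Int) letter =>
      if (s.toList.count letter % 2 == 1 : Bool) then count + 1 else count) := by
    funext count c
    rw [PySem.Dict.getD_counter, PySem.Int.mod_eq_emod_of_pos (by norm_num)]
    congr 1
    simp only [beq_iff_eq, eq_iff_iff]
    constructor <;> intro h <;> omega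
  rw [hfun, PySem.List.foldl_count_if]
  obtain ⟨hnd, hmem⟩ := toggle_inv s.toList PySem.Set.empty List.nodup_nil
  have hmem' : ∀ c, c ∈ s.toList.foldl (fun st letter =>
      if st.contains letter then PySem.Set.discard st letter else PySem.Set.add st letter)
      PySem.Set.empty ↔ s.toList.count c % 2 = 1 := by
    intro c
    rw [hmem c]
    simp [PySem.Set.empty]
  have hperm : s.toList.foldl (fun st letter =>
      if st.contains letter then PySem.Set.discard st letter else PySem.Set.add st letter)
      PySem.Set.empty |>.Perm
      ((PySem.Set.ofList s.toList).filter (fun c => s.toList.count c % 2 == 1)) := by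
    refine (List.perm_ext_iff_of_nodup hnd (List.Nodup.filter _ (PySem.Set.nodup_ofList s.toList))).2 ?_
    intro a
    rw [hmem' a, List.mem_filter, PySem.Set.mem_ofList]
    constructor
    · intro h
      refine ⟨List.count_pos_iff.1 (by omega), by simpa using h⟩
    · intro h
      simpa using h.2
  rw [PySem.Set.len, hperm.length_eq, ← List.countP_eq_length_filter]
  simp
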